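-- pv_equiv track=rewrite | github.com/kkuntner/advent-of-code-2024 | 10/ten-part-2.py | search
-- ===== SOURCE A (Python) =====
-- def search(map, number, countermap):
--
--         newcountermap = [[set() for x in range(len(map[0]))] for y in range(len(map))]
--
--         for y in range(0, len(map)):
--             for x in range(0, len(map[y])):
--                 if map[y][x] == number:
--                     if number == 9:
--                         newcountermap[y][x].add ((x, y))
--                     else:
--                         # see if above exists, and it is a number+1
--                         # if yes, add countermap's same position to up
--                         if y > 0 and map[y-1][x] == number+1:
--                             newcountermap[y][x] |= countermap[y-1][x]
--                         # see if below exists, and it is a number+1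
--                         # if yes, add countermap's same position to up
--                         if y < len(map)-1 and map[y+1][x] == number+1:
--                             newcountermap[y][x] |= countermap[y+1][x]
--                         # see if left exists, and it is a number+1
--                         # if yes, add countermap's same position to up
--                         if x > 0 and map[y][x-1] == number+1:
--                             newcountermap[y][x] |= countermap[y][x-1]
--                         # see if right exists, and it is a number+1
--                         # if yes, add countermap's same position to up
--                         if x < len(map[y])-1 and map[y][x+1] == number+1:
--                             newcountermap[y][x] |= countermap[y][x+1]
--
--         return newcountermap
-- ===== SOURCE B (Python) =====
-- def search(map, number, countermap):
--     h = len(map)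
--     w = len(map[0])
--     if number == 9:
--         return [[({(x, y)} if map[y][x] == 9 else set()) for x in range(w)]
--                 for y in range(h)]
--     # contribution grid: a cell offers its countermap set iff its height is number+1
--     contrib = [[countermap[y][x] if map[y][x] == number + 1 else set()
--                 for x in range(w)] for y in range(h)]
--     emptyrow = [set()] * w
--     # whole-grid shifts: what each cell sees above / below / left / right of itself
--     up = [emptyrow] + contrib[:-1]
--     down = contrib[1:] + [emptyrow]
--     left = [[set()] + row[:-1] for row in contrib]
--     right = [row[1:] + [set()] for row in contrib]
--     return [[set().union(up[y][x], down[y][x], left[y][x], right[y][x])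
--              if map[y][x] == number else set()
--              for x in range(w)] for y in range(h)]
-- ===== Notes on version B (the rewrite author's own statement) =====
-- stated objective: alternative
-- what changed: A mutates a pre-built grid of sets in nested loops with four separately bounds-guarded neighbour reads per cell; B instead builds four whole-grid shifted copies of a masked contribution grid (up/down/left/right via list slicing with empty-set padding, no index arithmetic or bounds checks) and produces the result as an elementwise union of the four shifts on cells whose height equals number.
-- outside the precondition, e.g. on search([[1]], 0, []): A returns [[set()]], B raises IndexError
import Mathlib
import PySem

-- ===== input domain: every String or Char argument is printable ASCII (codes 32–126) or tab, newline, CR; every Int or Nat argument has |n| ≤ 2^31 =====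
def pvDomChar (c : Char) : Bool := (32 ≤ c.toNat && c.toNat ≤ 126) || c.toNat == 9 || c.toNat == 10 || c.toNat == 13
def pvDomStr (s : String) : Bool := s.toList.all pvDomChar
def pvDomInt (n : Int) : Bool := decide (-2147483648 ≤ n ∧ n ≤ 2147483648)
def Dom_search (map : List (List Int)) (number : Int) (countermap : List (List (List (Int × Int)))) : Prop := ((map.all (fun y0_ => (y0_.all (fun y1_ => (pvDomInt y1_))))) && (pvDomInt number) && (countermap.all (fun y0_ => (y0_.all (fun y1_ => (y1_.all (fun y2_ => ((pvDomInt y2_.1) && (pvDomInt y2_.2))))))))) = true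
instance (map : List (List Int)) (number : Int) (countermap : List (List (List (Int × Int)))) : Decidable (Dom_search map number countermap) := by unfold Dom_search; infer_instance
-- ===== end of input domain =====

-- B replaces A's per-cell guarded-neighbour gathering by four whole-grid shifted copies of a
-- masked contribution grid (built by slicing with empty-set padding) merged elementwise
-- (objective: alternative).  Equivalence is about the RETURN value; neither program mutates
-- its arguments.

-- ===== PORT A =====
-- Nat indices are exact here: every Python index in A is a nonnegative loop counter (or counter±1
-- under a guard), and Pre_search keeps every performed access in range, so `getD`'s defaults are
-- never reached on admitted inputs.
def pvUpd2 (g : List (List (List (Int × Int)))) (y x : Nat)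
    (f : List (Int × Int) → List (Int × Int)) : List (List (List (Int × Int))) :=
  g.modify y (fun row => row.modify x f)

-- the body of A's inner loop (the Python loop body, as a named helper)
def pvStepA (map : List (List Int)) (number : Int) (countermap : List (List (List (Int × Int))))
    (y x : Nat) (acc : List (List (List (Int × Int)))) : List (List (List (Int × Int))) :=
  if (map.getD y []).getD x 0 = number then
    if number = 9 then
      pvUpd2 acc y x (fun s => PySem.Set.add s ((x : Int), (y : Int)))
    else
      let acc1 := if 0 < y ∧ (map.getD (y - 1) []).getD x 0 = number + 1 then
          pvUpd2 acc y x (fun s => PySem.Set.union s ((countermap.getD (y - 1) []).getD x [])) else acc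
      let acc2 := if y < map.length - 1 ∧ (map.getD (y + 1) []).getD x 0 = number + 1 then
          pvUpd2 acc1 y x (fun s => PySem.Set.union s ((countermap.getD (y + 1) []).getD x [])) else acc1
      let acc3 := if 0 < x ∧ (map.getD y []).getD (x - 1) 0 = number + 1 then
          pvUpd2 acc2 y x (fun s => PySem.Set.union s ((countermap.getD y []).getD (x - 1) [])) else acc2
      if x < (map.getD y []).length - 1 ∧ (map.getD y []).getD (x + 1) 0 = number + 1 then
          pvUpd2 acc3 y x (fun s => PySem.Set.union s ((countermap.getD y []).getD (x + 1) [])) else acc3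
  else acc

def search (map : List (List Int)) (number : Int) (countermap : List (List (List (Int × Int)))) :
    List (List (List (Int × Int))) :=
  let newcountermap : List (List (List (Int × Int))) :=
    (List.range map.length).map (fun _ =>
      (List.range (map.getD 0 []).length).map (fun _ => ([] : List (Int × Int))))
  (List.range map.length).foldl (fun acc y =>
    (List.range ((map.getD y []).length)).foldl (fun acc x =>
      pvStepA map number countermap y x acc) acc) newcountermap

-- ===== PORT B =====
-- contribution grid: a cell offers its countermap set iff its height is number+1
def pvContrib (map : List (List Int)) (number : Int)
    (countermap : List (List (List (Int × Int)))) (h w : Nat) :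
    List (List (List (Int × Int))) :=
  (List.range h).map (fun y => (List.range w).map (fun x =>
    if (map.getD y []).getD x 0 = number + 1 then (countermap.getD y []).getD x [] else []))

def pvEmptyRow (w : Nat) : List (List (Int × Int)) :=
  (List.range w).map (fun _ => ([] : List (Int × Int)))

-- Python slices of the forms grid[:-1] / grid[1:] are ported as List.dropLast / List.drop 1
-- (exact for these slices); set().union(a,b,c,d) is the fold of Set.union over [a,b,c,d] from [].
def search_alt (map : List (List Int)) (number : Int) (countermap : List (List (List (Int × Int)))) :
    List (List (List (Int × Int))) :=
  let h := map.length
  let w := (map.getD 0 []).length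
  if number = 9 then
    (List.range h).map (fun y => (List.range w).map (fun x =>
      if (map.getD y []).getD x 0 = 9 then [((x : Int), (y : Int))] else []))
  else
    let contrib := pvContrib map number countermap h w
    -- whole-grid shifts: what each cell sees above / below / left / right of itself
    let up := pvEmptyRow w :: contrib.dropLast
    let down := contrib.drop 1 ++ [pvEmptyRow w]
    let left := contrib.map (fun row => ([] : List (Int × Int)) :: row.dropLast)
    let right := contrib.map (fun row => row.drop 1 ++ [([] : List (Int × Int))])
    (List.range h).map (fun y => (List.range w).map (fun x =>
      if (map.getD y []).getD x 0 = number then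
        [(up.getD y []).getD x [], (down.getD y []).getD x [],
         (left.getD y []).getD x [], (right.getD y []).getD x []].foldl PySem.Set.union []
      else []))

-- ===== PRECONDITION & SPEC =====
-- Pre_ restricts to the natural domain of this AoC grid code: a nonempty rectangular map whose
-- countermap has an entry at every cell of height number+1.  Outside it A raises IndexError
-- whenever an out-of-shape cell is actually reached (an empty map, a write past a short row, a
-- missing countermap entry next to a number-cell); what ragged or short-countermap inputs that
-- escape the exception return is an accident of which cells happen to be visited, and B raises
-- on some of them where A happens to return.
def Pre_search (map : List (List Int)) (number : Int) (countermap : List (List (List (Int × Int)))) : Prop :=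
  map ≠ [] ∧ (∀ row ∈ map, row.length = (map.getD 0 []).length) ∧
  (number ≠ 9 → ∀ y < map.length, ∀ x < (map.getD 0 []).length,
    (map.getD y []).getD x 0 = number + 1 → y < countermap.length ∧ x < (countermap.getD y []).length)
instance (map : List (List Int)) (number : Int) (countermap : List (List (List (Int × Int)))) : Decidable (Pre_search map number countermap) := by unfold Pre_search; infer_instance

def pvWitness_search : List (List Int) × Int × (List (List (List (Int × Int)))) :=
  ([[0, 1], [1, 2]], 0, [[[(0, 0)], []], [[], [(1, 1)]]])

def Spec_search (map : List (List Int)) (number : Int) (countermap : List (List (List (Int × Int)))) (out : List (List (List (Int × Int)))) : Prop := out = search_alt map number countermap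
instance (map : List (List Int)) (number : Int) (countermap : List (List (List (Int × Int)))) (out : List (List (List (Int × Int)))) : Decidable (Spec_search map number countermap out) := by unfold Spec_search; infer_instance

-- ===== CLAIM (what is proved, stated in full; the proofs are below) =====
def Claim_equal_search : Prop := ∀ (map : List (List Int)) (number : Int) (countermap : List (List (List (Int × Int)))), Dom_search map number countermap → Pre_search map number countermap → Spec_search map number countermap (search map number countermap)

-- ===== LEMMAS AND PROOFS =====

-- per-cell effect of A's loop body on the cell (y,x) it writes
def pvCellF (map : List (List Int)) (number : Int) (countermap : List (List (List (Int × Int))))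
    (y x : Nat) (s : List (Int × Int)) : List (Int × Int) :=
  if (map.getD y []).getD x 0 = number then
    if number = 9 then PySem.Set.add s ((x : Int), (y : Int))
    else
      let s1 := if 0 < y ∧ (map.getD (y - 1) []).getD x 0 = number + 1 then
          PySem.Set.union s ((countermap.getD (y - 1) []).getD x []) else s
      let s2 := if y < map.length - 1 ∧ (map.getD (y + 1) []).getD x 0 = number + 1 then
          PySem.Set.union s1 ((countermap.getD (y + 1) []).getD x []) else s1
      let s3 := if 0 < x ∧ (map.getD y []).getD (x - 1) 0 = number + 1 then
          PySem.Set.union s2 ((countermap.getD y []).getD (x - 1) []) else s2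
      if x < (map.getD y []).length - 1 ∧ (map.getD y []).getD (x + 1) 0 = number + 1 then
          PySem.Set.union s3 ((countermap.getD y []).getD (x + 1) []) else s3
  else s

theorem pvModify_id {α : Type} (l : List α) (i : Nat) : l.modify i (fun a => a) = l := by
  apply List.ext_getElem (by simp)
  intro j h1 h2
  simp [List.getElem_modify]

theorem pvModify_modify {α : Type} (l : List α) (i : Nat) (f g : α → α) :
    (l.modify i f).modify i g = l.modify i (fun a => g (f a)) := by
  apply List.ext_getElem (by simp)
  intro j h1 h2
  simp only [List.getElem_modify]
  split_ifs <;> simp_all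

theorem pvStepA_modify (map : List (List Int)) (number : Int)
    (countermap : List (List (List (Int × Int)))) (y x : Nat)
    (acc : List (List (List (Int × Int)))) :
    pvStepA map number countermap y x acc =
      acc.modify y (fun row => row.modify x (pvCellF map number countermap y x)) := by
  unfold pvStepA pvCellF
  split_ifs <;> simp_all [pvUpd2, pvModify_modify, pvModify_id]

theorem pvFoldl_modify_fixed {α β : Type} (l : List β) (i : Nat) (F : β → α → α) :
    ∀ (g : List α),
      l.foldl (fun acc b => acc.modify i (F b)) g =
        g.modify i (fun a => l.foldl (fun a b => F b a) a) := by
  induction l with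
  | nil => intro g; simp [pvModify_id]
  | cons b l ih => intro g; simp [List.foldl_cons, ih, pvModify_modify]

theorem pvLength_foldl_range_modify {α : Type} (S : Nat → α → α) (n : Nat) (l : List α) :
    ((List.range n).foldl (fun acc i => acc.modify i (S i)) l).length = l.length := by
  induction n with
  | zero => simp
  | succ n ih => simp [List.range_succ, List.foldl_append, ih]

theorem pvGetElem_foldl_range_modify {α : Type} (S : Nat → α → α) (n : Nat) (l : List α)
    (j : Nat) (hj : j < l.length) :
    ((List.range n).foldl (fun acc i => acc.modify i (S i)) l)[j]'(by
      rw [pvLength_foldl_range_modify]; exact hj) =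
      if j < n then S j l[j] else l[j] := by
  induction n with
  | zero => simp
  | succ n ih =>
    simp only [List.range_succ, List.foldl_append, List.foldl_cons, List.foldl_nil]
    rw [List.getElem_modify]
    by_cases h' : n = j
    · subst h'
      simp [ih]
    · by_cases h : j < n
      · simp [h', ih, h, Nat.lt_succ_of_lt h]
      · have hn1 : ¬ j < n + 1 := by omega
        simp [h', ih, h, hn1]

theorem pvGetD_mem {α : Type} (l : List α) (i : Nat) (d : α) (h : i < l.length) :
    l.getD i d ∈ l := by
  simp [List.getD_eq_getElem?_getD, List.getElem?_eq_getElem h]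

-- A in closed form: a grid of per-cell values
theorem pvSearch_closed (map : List (List Int)) (number : Int)
    (countermap : List (List (List (Int × Int))))
    (hrect : ∀ row ∈ map, row.length = (map.getD 0 []).length) :
    search map number countermap =
      (List.range map.length).map (fun y =>
        (List.range ((map.getD 0 []).length)).map (fun x =>
          pvCellF map number countermap y x [])) := by
  unfold search
  rw [PySem.List.foldl_congr_mem _ _
    (fun acc y => acc.modify y (fun row =>
      (List.range ((map.getD 0 []).length)).foldl
        (fun row x => row.modify x (pvCellF map number countermap y x)) row)) _ ?_]
  · apply List.ext_getElem
    · simp [pvLength_foldl_range_modify]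
    · intro y h1 h2
      have hy : y < map.length := by simpa using h2
      rw [pvGetElem_foldl_range_modify _ _ _ y (by simpa using hy)]
      rw [if_pos hy]
      simp only [List.getElem_map, List.getElem_range]
      apply List.ext_getElem
      · simp [pvLength_foldl_range_modify]
      · intro x hx1 hx2
        have hxw : x < (map.getD 0 []).length := by simpa using hx2
        rw [pvGetElem_foldl_range_modify _ _ _ x (by simpa using hxw), if_pos hxw]
        simp
  · intro acc y hy
    simp only [List.mem_range] at hy
    have hrow : (map.getD y []).length = (map.getD 0 []).length :=
      hrect _ (pvGetD_mem map y [] hy)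
    rw [hrow,
      PySem.List.foldl_congr_mem _ _
        (fun acc x => acc.modify y (fun row => row.modify x (pvCellF map number countermap y x))) _
        (fun acc x _ => pvStepA_modify map number countermap y x acc),
      pvFoldl_modify_fixed]

-- B-side indexing facts -----------------------------------------------------

theorem pvGetD_dropLast {α : Type} (l : List α) (k : Nat) (d : α) (h : k < l.length - 1) :
    l.dropLast.getD k d = l.getD k d := by
  rw [List.getD_eq_getElem _ _ (by simp; omega), List.getD_eq_getElem _ _ (by omega)]
  exact List.getElem_dropLast _

theorem pvShiftR_getD {α : Type} (l : List α) (e : α) (x : Nat) (d : α)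
    (h : x + 1 < l.length) :
    (l.drop 1 ++ [e]).getD x d = l.getD (x + 1) d := by
  rw [List.getD_eq_getElem _ _ (by simp only [List.length_append, List.length_drop,
      List.length_cons, List.length_nil]; omega),
    List.getElem_append_left (by simp only [List.length_drop]; omega),
    List.getElem_drop, List.getD_eq_getElem _ _ h]
  have hc : 1 + x = x + 1 := by omega
  simp [hc]

theorem pvShiftR_getD_last {α : Type} (l : List α) (e : α) (x : Nat) (d : α)
    (h : x + 1 = l.length) :
    (l.drop 1 ++ [e]).getD x d = e := by
  rw [List.getD_eq_getElem _ _ (by simp only [List.length_append, List.length_drop,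
      List.length_cons, List.length_nil]; omega),
    List.getElem_append_right (by simp only [List.length_drop]; omega)]
  simp

-- value of the contribution grid at an in-range cell
theorem pvContrib_cell (map : List (List Int)) (number : Int)
    (countermap : List (List (List (Int × Int)))) (h w y x : Nat)
    (hy : y < h) (hx : x < w) :
    ((pvContrib map number countermap h w).getD y []).getD x [] =
      if (map.getD y []).getD x 0 = number + 1 then (countermap.getD y []).getD x [] else [] := by
  unfold pvContrib
  rw [PySem.List.getD_map_range _ _ _ _ hy, PySem.List.getD_map_range _ _ _ _ hx]

theorem pvEmptyRow_cell (w x : Nat) (hx : x < w) : (pvEmptyRow w).getD x [] = [] := by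
  unfold pvEmptyRow
  rw [PySem.List.getD_map_range _ _ _ _ hx]

theorem pvContrib_length (map : List (List Int)) (number : Int)
    (countermap : List (List (List (Int × Int)))) (h w : Nat) :
    (pvContrib map number countermap h w).length = h := by
  simp [pvContrib]

theorem pvUp_cell (map : List (List Int)) (number : Int)
    (countermap : List (List (List (Int × Int)))) (h w y x : Nat)
    (hy : y < h) (hx : x < w) :
    (((pvEmptyRow w :: (pvContrib map number countermap h w).dropLast)).getD y []).getD x [] =
      if 0 < y ∧ (map.getD (y - 1) []).getD x 0 = number + 1 then
        (countermap.getD (y - 1) []).getD x [] else [] := by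
  match y with
  | 0 =>
    rw [show (pvEmptyRow w :: (pvContrib map number countermap h w).dropLast).getD 0 [] =
      pvEmptyRow w from rfl, pvEmptyRow_cell w x hx]
    simp
  | Nat.succ k =>
    have h1 : (pvEmptyRow w :: (pvContrib map number countermap h w).dropLast).getD (k + 1) [] =
        (pvContrib map number countermap h w).dropLast.getD k [] := rfl
    rw [h1, pvGetD_dropLast _ _ _ (by rw [pvContrib_length]; omega),
      pvContrib_cell map number countermap h w k x (by omega) hx]
    simp

theorem pvDown_cell (map : List (List Int)) (number : Int)
    (countermap : List (List (List (Int × Int)))) (h w y x : Nat)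
    (hy : y < h) (hx : x < w) :
    ((((pvContrib map number countermap h w).drop 1 ++ [pvEmptyRow w])).getD y []).getD x [] =
      if y < h - 1 ∧ (map.getD (y + 1) []).getD x 0 = number + 1 then
        (countermap.getD (y + 1) []).getD x [] else [] := by
  by_cases hy1 : y < h - 1
  · rw [pvShiftR_getD _ _ _ _ (by rw [pvContrib_length]; omega),
      pvContrib_cell map number countermap h w (y + 1) x (by omega) hx]
    simp [hy1]
  · rw [pvShiftR_getD_last _ _ _ _ (by rw [pvContrib_length]; omega),
      pvEmptyRow_cell w x hx]
    simp [hy1]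

theorem pvLeft_cell (map : List (List Int)) (number : Int)
    (countermap : List (List (List (Int × Int)))) (h w y x : Nat)
    (hy : y < h) (hx : x < w)
    (hrow : (map.getD y []).length = w) :
    (((pvContrib map number countermap h w).map
        (fun row => ([] : List (Int × Int)) :: row.dropLast)).getD y []).getD x [] =
      if 0 < x ∧ (map.getD y []).getD (x - 1) 0 = number + 1 then
        (countermap.getD y []).getD (x - 1) [] else [] := by
  have e1 : ((pvContrib map number countermap h w).map
      (fun row => ([] : List (Int × Int)) :: row.dropLast)).getD y [] =
      ([] : List (Int × Int)) :: ((pvContrib map number countermap h w).getD y []).dropLast := by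
    rw [List.getD_eq_getElem _ _ (by simp [pvContrib_length]; omega),
      List.getD_eq_getElem _ _ (by rw [pvContrib_length]; omega), List.getElem_map]
  rw [e1]
  match x with
  | 0 => simp
  | Nat.succ k =>
    have h1 : (([] : List (Int × Int)) ::
        ((pvContrib map number countermap h w).getD y []).dropLast).getD (k + 1) [] =
        ((pvContrib map number countermap h w).getD y []).dropLast.getD k [] := rfl
    have hlen : ((pvContrib map number countermap h w).getD y []).length = w := by
      unfold pvContrib
      rw [PySem.List.getD_map_range _ _ _ _ hy]; simp
    rw [h1, pvGetD_dropLast _ _ _ (by omega),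
      pvContrib_cell map number countermap h w y k hy (by omega)]
    simp

theorem pvRight_cell (map : List (List Int)) (number : Int)
    (countermap : List (List (List (Int × Int)))) (h w y x : Nat)
    (hy : y < h) (hx : x < w) :
    (((pvContrib map number countermap h w).map
        (fun row => row.drop 1 ++ [([] : List (Int × Int))])).getD y []).getD x [] =
      if x < w - 1 ∧ (map.getD y []).getD (x + 1) 0 = number + 1 then
        (countermap.getD y []).getD (x + 1) [] else [] := by
  have e1 : ((pvContrib map number countermap h w).map
      (fun row => row.drop 1 ++ [([] : List (Int × Int))])).getD y [] =
      ((pvContrib map number countermap h w).getD y []).drop 1 ++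
        [([] : List (Int × Int))] := by
    rw [List.getD_eq_getElem _ _ (by simp only [List.length_map, pvContrib_length]; omega),
      List.getD_eq_getElem _ _ (by rw [pvContrib_length]; omega), List.getElem_map]
  have hlen : ((pvContrib map number countermap h w).getD y []).length = w := by
    unfold pvContrib
    rw [PySem.List.getD_map_range _ _ _ _ hy]; simp
  rw [e1]
  by_cases hx1 : x < w - 1
  · rw [pvShiftR_getD _ _ _ _ (by omega),
      pvContrib_cell map number countermap h w y (x + 1) hy (by omega)]
    simp [hx1]
  · rw [pvShiftR_getD_last _ _ _ _ (by omega)]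
    simp [hx1]

-- per-cell agreement for number ≠ 9
theorem pvCell_agree (map : List (List Int)) (number : Int)
    (countermap : List (List (List (Int × Int)))) (y x : Nat)
    (h9 : number ≠ 9)
    (hy : y < map.length) (hx : x < (map.getD 0 []).length)
    (hrow : (map.getD y []).length = (map.getD 0 []).length) :
    pvCellF map number countermap y x [] =
      (if (map.getD y []).getD x 0 = number then
        [((pvEmptyRow (map.getD 0 []).length ::
            (pvContrib map number countermap map.length ((map.getD 0 []).length)).dropLast).getD y []).getD x [],
         (((pvContrib map number countermap map.length ((map.getD 0 []).length)).drop 1 ++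
            [pvEmptyRow (map.getD 0 []).length]).getD y []).getD x [],
         (((pvContrib map number countermap map.length ((map.getD 0 []).length)).map
            (fun row => ([] : List (Int × Int)) :: row.dropLast)).getD y []).getD x [],
         (((pvContrib map number countermap map.length ((map.getD 0 []).length)).map
            (fun row => row.drop 1 ++ [([] : List (Int × Int))])).getD y []).getD x []].foldl
          PySem.Set.union []
      else []) := by
  rw [pvUp_cell map number countermap _ _ y x hy hx,
    pvDown_cell map number countermap _ _ y x hy hx,
    pvLeft_cell map number countermap _ _ y x hy hx hrow,
    pvRight_cell map number countermap _ _ y x hy hx]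
  unfold pvCellF
  by_cases hm : (map.getD y []).getD x 0 = number
  · simp only [hm, h9, if_true, if_false, List.foldl_cons, List.foldl_nil, hrow]
    split_ifs <;> rfl
  · rw [if_neg hm, if_neg hm]

-- ===== VERDICT (by name: the statement is the Claim_ definition above) =====
theorem search_spec : Claim_equal_search := by
  intro map number countermap _ hpre
  obtain ⟨hne, hrect, -⟩ := hpre
  unfold Spec_search
  rw [pvSearch_closed map number countermap hrect]
  simp only [search_alt]
  by_cases h9 : number = 9
  · rw [if_pos h9]
    subst h9
    apply List.map_congr_left
    intro y hy
    apply List.map_congr_left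
    intro x hx
    unfold pvCellF
    by_cases hm : (map.getD y []).getD x 0 = 9
    · simp [PySem.Set.add]
    · simp
  · rw [if_neg h9]
    apply List.map_congr_left
    intro y hy
    simp only [List.mem_range] at hy
    apply List.map_congr_left
    intro x hx
    simp only [List.mem_range] at hx
    exact pvCell_agree map number countermap y x h9 hy hx
      (hrect _ (pvGetD_mem map y [] hy))
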